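-- pv_equiv track=rewrite | github.com/ngwatso/1.1-module-3-cs | main.py | csLongestPossible
-- ===== SOURCE A (Python) =====
-- def csLongestPossible(str_1, str_2):
--     newStr = ""
--
--     for char in str_1:
--         if char in newStr:
--             continue
--         else:
--             newStr += char
--     for char in str_2:
--         if char in newStr:
--             continue
--         else:
--             newStr += char
--     strList = sorted(list(newStr))
--
--     return ''.join(strList)
-- ===== SOURCE B (Python) =====
-- def _insert_sorted(chars, ch):
--     if not chars:
--         return [ch]
--     head = chars[0]
--     if head < ch:
--         return [head] + _insert_sorted(chars[1:], ch)
--     if head == ch: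
--         return chars
--     return [ch] + chars
--
--
-- def csLongestPossible(str_1, str_2):
--     result = []
--     for ch in str_1 + str_2:
--         result = _insert_sorted(result, ch)
--     return ''.join(result)
-- ===== Notes on version B (the rewrite author's own statement) =====
-- stated objective: alternative
-- what changed: Instead of appending first-occurrence characters to an unordered dedup string and sorting it at the end, B maintains a single always-sorted duplicate-free list via in-place sorted insertion (dedup and ordering merged into one incremental structure), with no final sort step.
import Mathlib
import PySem

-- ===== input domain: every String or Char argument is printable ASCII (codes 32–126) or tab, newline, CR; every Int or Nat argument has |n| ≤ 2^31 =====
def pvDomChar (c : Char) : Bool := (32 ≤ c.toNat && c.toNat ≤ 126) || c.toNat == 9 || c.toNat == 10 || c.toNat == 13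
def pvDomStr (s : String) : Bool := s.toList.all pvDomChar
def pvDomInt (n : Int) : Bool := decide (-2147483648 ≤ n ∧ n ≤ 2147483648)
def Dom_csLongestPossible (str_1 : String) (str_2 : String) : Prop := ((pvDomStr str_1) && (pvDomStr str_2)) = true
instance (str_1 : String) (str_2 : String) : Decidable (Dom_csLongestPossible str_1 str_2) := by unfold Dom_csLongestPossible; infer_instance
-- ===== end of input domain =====

-- B keeps one always-sorted duplicate-free list by sorted insertion instead of A's
-- append-then-sort; alternative decomposition, same cost class.

-- ===== PORT A =====
-- A: dedup-append each char of str_1 then str_2 ('char in newStr' on a single char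
-- is element membership), then sort and join.
def csLongestPossible (str_1 : String) (str_2 : String) : String :=
  let newStr1 := str_1.toList.foldl (fun acc c => if acc.contains c then acc else acc ++ [c]) []
  let newStr := str_2.toList.foldl (fun acc c => if acc.contains c then acc else acc ++ [c]) newStr1
  String.ofList (PySem.List.sorted newStr (fun c => c))

-- ===== PORT B =====
-- B's helper _insert_sorted: insert ch into a sorted list, skipping if present.
def pvInsertSorted : List Char → Char → List Char
  | [], c => [c]
  | x :: xs, c =>
    if x < c then x :: pvInsertSorted xs c
    else if x = c then x :: xs
    else c :: x :: xs

def csLongestPossible_alt (str_1 : String) (str_2 : String) : String :=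
  String.ofList ((str_1.toList ++ str_2.toList).foldl pvInsertSorted [])

-- ===== PRECONDITION & SPEC =====
def Spec_csLongestPossible (str_1 : String) (str_2 : String) (out : String) : Prop := out = csLongestPossible_alt str_1 str_2
instance (str_1 : String) (str_2 : String) (out : String) : Decidable (Spec_csLongestPossible str_1 str_2 out) := by unfold Spec_csLongestPossible; infer_instance

-- ===== CLAIM (what is proved, stated in full; the proofs are below) =====
def Claim_equal_csLongestPossible : Prop := ∀ (str_1 : String) (str_2 : String), Dom_csLongestPossible str_1 str_2 → Spec_csLongestPossible str_1 str_2 (csLongestPossible str_1 str_2)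

-- ===== LEMMAS AND PROOFS =====

-- A's dedup step, named for the proofs (definitionally A's lambda).
def pvStepA (acc : List Char) (c : Char) : List Char :=
  if acc.contains c then acc else acc ++ [c]

theorem mem_pvInsertSorted {y c : Char} {s : List Char}
    (h : y ∈ pvInsertSorted s c) : y = c ∨ y ∈ s := by
  induction s with
  | nil => simpa [pvInsertSorted] using h
  | cons x xs ih =>
    simp only [pvInsertSorted] at h
    split_ifs at h with h1 h2
    · rcases List.mem_cons.1 h with h | h
      · exact Or.inr (by simp [h])
      · rcases ih h with h | h
        · exact Or.inl h
        · exact Or.inr (List.mem_cons_of_mem _ h)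
    · exact Or.inr h
    · rcases List.mem_cons.1 h with h | h
      · exact Or.inl h
      · exact Or.inr h

theorem pvInsertSorted_of_mem {c : Char} {s : List Char}
    (hs : s.Pairwise (· < ·)) (hc : c ∈ s) : pvInsertSorted s c = s := by
  induction s with
  | nil => cases hc
  | cons x xs ih =>
    rcases List.mem_cons.1 hc with h | h
    · subst h
      simp [pvInsertSorted]
    · have hxc : x < c := (List.pairwise_cons.1 hs).1 c h
      simp only [pvInsertSorted, if_pos hxc]
      rw [ih (List.pairwise_cons.1 hs).2 h]

theorem pvInsertSorted_perm {c : Char} {s : List Char}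
    (hc : c ∉ s) : (pvInsertSorted s c).Perm (c :: s) := by
  induction s with
  | nil => simp [pvInsertSorted]
  | cons x xs ih =>
    have hne : ¬ x = c := fun h => hc (by simp [h])
    have hcxs : c ∉ xs := fun h => hc (List.mem_cons_of_mem _ h)
    simp only [pvInsertSorted, if_neg hne]
    split_ifs with h1
    · exact ((ih hcxs).cons x).trans (List.Perm.swap c x xs)
    · exact List.Perm.refl _

theorem pvInsertSorted_pairwise {c : Char} {s : List Char}
    (hs : s.Pairwise (· < ·)) : (pvInsertSorted s c).Pairwise (· < ·) := by
  induction s with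
  | nil => simp [pvInsertSorted]
  | cons x xs ih =>
    obtain ⟨hx, hxs⟩ := List.pairwise_cons.1 hs
    simp only [pvInsertSorted]
    split_ifs with h1 h2
    · refine List.pairwise_cons.2 ⟨?_, ih hxs⟩
      intro y hy
      rcases mem_pvInsertSorted hy with h | h
      · exact h ▸ h1
      · exact hx y h
    · exact hs
    · refine List.pairwise_cons.2 ⟨?_, hs⟩
      intro y hy
      have hcx : c < x := lt_of_le_of_ne (not_lt.1 h1) (fun h => h2 h.symm)
      rcases List.mem_cons.1 hy with h | h
      · exact h ▸ hcx
      · exact lt_trans hcx (hx y h)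

-- Loop invariant: B's sorted accumulator stays a sorted permutation of A's dedup accumulator.
theorem pv_fold_inv (cs : List Char) : ∀ (d s : List Char),
    s.Perm d → s.Pairwise (· < ·) →
    (cs.foldl pvInsertSorted s).Perm (cs.foldl pvStepA d) ∧
      (cs.foldl pvInsertSorted s).Pairwise (· < ·) := by
  induction cs with
  | nil => exact fun d s hp hw => ⟨hp, hw⟩
  | cons c cs ih =>
    intro d s hp hw
    simp only [List.foldl_cons]
    by_cases hc : c ∈ d
    · have hcs : c ∈ s := hp.mem_iff.2 hc
      rw [pvInsertSorted_of_mem hw hcs,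
        show pvStepA d c = d by simp [pvStepA, hc]]
      exact ih d s hp hw
    · have hcs : c ∉ s := fun h => hc (hp.mem_iff.1 h)
      rw [show pvStepA d c = d ++ [c] by simp [pvStepA, hc]]
      refine ih (d ++ [c]) (pvInsertSorted s c) ?_ (pvInsertSorted_pairwise hw)
      exact ((pvInsertSorted_perm hcs).trans (hp.cons c)).trans
        (List.perm_append_singleton c d).symm

-- ===== VERDICT (by name: the statement is the Claim_ definition above) =====
theorem csLongestPossible_spec : Claim_equal_csLongestPossible := by
  unfold Claim_equal_csLongestPossible
  intro str_1 str_2 _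
  unfold Spec_csLongestPossible csLongestPossible_alt
  obtain ⟨hperm, hpw⟩ := pv_fold_inv (str_1.toList ++ str_2.toList) [] []
    (List.Perm.refl []) List.Pairwise.nil
  have hA : csLongestPossible str_1 str_2
      = String.ofList (PySem.List.sorted
          ((str_1.toList ++ str_2.toList).foldl pvStepA []) (fun c => c)) := by
    show String.ofList (PySem.List.sorted
        (str_2.toList.foldl pvStepA (str_1.toList.foldl pvStepA [])) (fun c => c)) = _
    rw [List.foldl_append]
  rw [hA]
  congr 1
  exact PySem.List.sorted_eq_of_perm_of_pairwise_lt _ _ (fun c => c) hperm hpw
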